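-- pv_equiv track=rewrite | github.com/borgbackup/borg | src/borg/helpers/shellpattern.py | _parse_braces
-- ===== SOURCE A (Python) =====
-- from queue import LifoQueue
--
-- def _parse_braces(pat):
--     """Returns the index values of paired braces in `pat` as a list of tuples.
--
--     The dict's keys are the indexes corresponding to opening braces. Initially,
--     they are set to a value of `None`. Once a corresponding closing brace is found,
--     the value is updated. All dict keys with a positive int value are valid pairs.
--
--     Cannot rely on re.match("[^\\(\\\\)*]?{.*[^\\(\\\\)*]}") because, while it
--     does handle unpaired braces and nested pairs of braces, it misses sequences
--     of paired braces. E.g.: "{foo,bar}{bar,baz}" would translate, incorrectly, to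
--     "(foo|bar\\}\\{bar|baz)" instead of, correctly, to "(foo|bar)(bar|baz)"
--
--     So this function parses in a left-to-right fashion, tracking pairs with a LIFO
--     queue: pushing opening braces on and popping them off when finding a closing
--     brace.
--     """
--     curly_q = LifoQueue()
--     pairs: dict[int, int] = dict()
--
--     for idx, c in enumerate(pat):
--         if c == "{":
--             if idx == 0 or pat[idx - 1] != "\\":
--                 # Opening brace is not escaped.
--                 # Add to dict
--                 pairs[idx] = None
--                 # Add to queue
--                 curly_q.put(idx)
--         if c == "}" and curly_q.qsize():
--             # If queue is empty, then cannot close pair.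
--             if idx > 0 and pat[idx - 1] != "\\":
--                 # Closing brace is not escaped.
--                 # Pop off the index of the corresponding opening brace, which
--                 # provides the key in the dict of pairs, and set its value.
--                 pairs[curly_q.get()] = idx
--     return [(opening, closing) for opening, closing in pairs.items() if closing is not None]
-- ===== SOURCE B (Python) =====
-- def _parse_braces(pat):
--     """Return index pairs of paired unescaped braces in `pat`.
--
--     Two staged passes: first collect the unescaped braces with their indexes,
--     then for every opening brace find its partner by a forward depth-counting
--     scan (the first closing brace at the same nesting depth).  No stack, no
--     dict; pairs come out in ascending opening-index order by construction.
--     """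
--     braces = [(i, c) for i, c in enumerate(pat)
--               if c in "{}" and (i == 0 or pat[i - 1] != "\\")]
--     pairs = []
--     for k, (opening, c) in enumerate(braces):
--         if c != "{":
--             continue
--         depth = 0
--         for idx, c2 in braces[k + 1:]:
--             if c2 == "{":
--                 depth += 1
--             elif depth == 0:
--                 pairs.append((opening, idx))
--                 break
--             else:
--                 depth -= 1
--     return pairs
-- ===== Notes on version B (the rewrite author's own statement) =====
-- stated objective: alternative
-- what changed: Replaces the single-pass LifoQueue-plus-None-sentinel-dict stack matcher with two staged passes: first tokenize the unescaped braces, then for each opening brace find its partner by an independent forward depth-counting scan (no stack, no dict, no sentinel); pairs arise directly in ascending opening order.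
import Mathlib
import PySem

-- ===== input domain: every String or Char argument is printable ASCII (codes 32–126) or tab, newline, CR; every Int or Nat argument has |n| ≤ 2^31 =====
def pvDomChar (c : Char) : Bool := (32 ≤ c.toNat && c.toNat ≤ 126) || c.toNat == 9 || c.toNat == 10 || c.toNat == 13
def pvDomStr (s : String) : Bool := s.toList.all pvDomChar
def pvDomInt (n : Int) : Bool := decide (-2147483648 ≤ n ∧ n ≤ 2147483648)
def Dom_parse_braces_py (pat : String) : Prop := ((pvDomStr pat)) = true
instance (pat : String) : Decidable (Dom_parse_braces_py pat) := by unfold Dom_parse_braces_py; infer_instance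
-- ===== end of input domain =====

-- B replaces A's single-pass LifoQueue + None-sentinel dict with two staged passes: tokenize
-- the unescaped braces, then find each opening brace's partner by an independent forward
-- depth-counting scan (no stack, no dict); objective: alternative algorithm, return value only.


-- ===== PORT A =====
-- A's final list comprehension: keep dict items whose value is not None
def pvFiltA (items : List (Int × Option Int)) : List (Int × Int) :=
  items.filterMap (fun p => p.2.map (fun cl => (p.1, cl)))

-- one iteration of A's for-loop; state = (LIFO queue as cons-list, pairs dict)
def pvStepA (chars : List Char) (s : List Int × PySem.Dict Int (Option Int)) (p : Int × Char) :
    List Int × PySem.Dict Int (Option Int) :=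
  let s1 := if p.2 = '{' ∧ (p.1 = 0 ∨ PySem.List.pyGetD chars (p.1 - 1) ' ' ≠ '\\')
            then (p.1 :: s.1, s.2.insert p.1 none) else s
  if p.2 = '}' ∧ s1.1 ≠ [] then
    if 0 < p.1 ∧ PySem.List.pyGetD chars (p.1 - 1) ' ' ≠ '\\' then
      match s1.1 with
      | o :: rest => (rest, s1.2.insert o (some p.1))
      | [] => s1
    else s1
  else s1

def parse_braces_py (pat : String) : List (Int × Int) :=
  let chars := pat.toList
  let st := (PySem.List.enumerate chars 0).foldl (pvStepA chars) ([], PySem.Dict.empty)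
  pvFiltA st.2.items

-- ===== PORT B =====
-- B's inner loop: forward scan with a depth counter, first closing brace at depth 0
def pvScanAt : Int → List (Int × Char) → Option Int
  | _, [] => none
  | d, (idx, c) :: ts =>
      if c = '{' then pvScanAt (d + 1) ts
      else if d = 0 then some idx
      else pvScanAt (d - 1) ts

-- B's outer loop over the brace tokens: every opening brace scans its own suffix
def pvScanPairs : List (Int × Char) → List (Int × Int)
  | [] => []
  | (opening, c) :: ts =>
      if c ≠ '{' then pvScanPairs ts
      else match pvScanAt 0 ts with
        | some idx => (opening, idx) :: pvScanPairs ts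
        | none => pvScanPairs ts

def parse_braces_py_alt (pat : String) : List (Int × Int) :=
  let chars := pat.toList
  let braces := (PySem.List.enumerate chars 0).filter
    (fun p => decide ((p.2 = '{' ∨ p.2 = '}') ∧ (p.1 = 0 ∨ PySem.List.pyGetD chars (p.1 - 1) ' ' ≠ '\\')))
  pvScanPairs braces

-- ===== PRECONDITION & SPEC =====
def Spec_parse_braces_py (pat : String) (out : List (Int × Int)) : Prop := out = parse_braces_py_alt pat
instance (pat : String) (out : List (Int × Int)) : Decidable (Spec_parse_braces_py pat out) := by unfold Spec_parse_braces_py; infer_instance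

-- ===== CLAIM (what is proved, stated in full; the proofs are below) =====
def Claim_equal_parse_braces_py : Prop := ∀ (pat : String), Dom_parse_braces_py pat → Spec_parse_braces_py pat (parse_braces_py pat)

-- ===== LEMMAS AND PROOFS =====

-- proof-side reference machine: the plain stack matcher over the enumerated characters
def pvMach (chars : List Char) (s : List Int × List (Int × Int)) (p : Int × Char) :
    List Int × List (Int × Int) :=
  let escaped := 0 < p.1 ∧ PySem.List.pyGetD chars (p.1 - 1) ' ' = '\\'
  if p.2 = '{' ∧ ¬escaped then (p.1 :: s.1, s.2)
  else if p.2 = '}' ∧ s.1 ≠ [] ∧ ¬escaped then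
    match s.1 with
    | o :: rest => (rest, s.2 ++ [(o, p.1)])
    | [] => s
  else s

-- step characterizations, A
lemma pvStepA_push (chars : List Char) (s : List Int × PySem.Dict Int (Option Int)) (p : Int × Char)
    (h1 : p.2 = '{') (h2 : p.1 = 0 ∨ PySem.List.pyGetD chars (p.1 - 1) ' ' ≠ '\\') :
    pvStepA chars s p = (p.1 :: s.1, s.2.insert p.1 none) := by
  simp [pvStepA, h1, h2]

lemma pvStepA_skip_open (chars : List Char) (s : List Int × PySem.Dict Int (Option Int)) (p : Int × Char)
    (h1 : p.2 = '{') (h2 : ¬(p.1 = 0 ∨ PySem.List.pyGetD chars (p.1 - 1) ' ' ≠ '\\')) :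
    pvStepA chars s p = s := by
  simp [pvStepA, h1, h2]

lemma pvStepA_pop (chars : List Char) (s : List Int × PySem.Dict Int (Option Int)) (p : Int × Char)
    (o : Int) (rest : List Int) (h1 : p.2 = '}') (hs : s.1 = o :: rest)
    (h2 : 0 < p.1 ∧ PySem.List.pyGetD chars (p.1 - 1) ' ' ≠ '\\') :
    pvStepA chars s p = (rest, s.2.insert o (some p.1)) := by
  simp [pvStepA, h1, hs, h2]

lemma pvStepA_noop_close (chars : List Char) (s : List Int × PySem.Dict Int (Option Int)) (p : Int × Char)
    (h1 : p.2 = '}') (h2 : ¬(0 < p.1 ∧ PySem.List.pyGetD chars (p.1 - 1) ' ' ≠ '\\')) :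
    pvStepA chars s p = s := by
  simp [pvStepA, h1, h2]

lemma pvStepA_nil_close (chars : List Char) (s : List Int × PySem.Dict Int (Option Int)) (p : Int × Char)
    (h1 : p.2 = '}') (hs : s.1 = []) :
    pvStepA chars s p = s := by
  simp [pvStepA, h1, hs]

lemma pvStepA_other (chars : List Char) (s : List Int × PySem.Dict Int (Option Int)) (p : Int × Char)
    (h1 : p.2 ≠ '{') (h2 : p.2 ≠ '}') :
    pvStepA chars s p = s := by
  simp [pvStepA, h1, h2]

-- step characterizations, reference machine
lemma pvMach_push (chars : List Char) (s : List Int × List (Int × Int)) (p : Int × Char)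
    (h1 : p.2 = '{') (h2 : ¬(0 < p.1 ∧ PySem.List.pyGetD chars (p.1 - 1) ' ' = '\\')) :
    pvMach chars s p = (p.1 :: s.1, s.2) := by
  simp [pvMach, h1, h2]

lemma pvMach_skip_open (chars : List Char) (s : List Int × List (Int × Int)) (p : Int × Char)
    (h1 : p.2 = '{') (h2 : 0 < p.1 ∧ PySem.List.pyGetD chars (p.1 - 1) ' ' = '\\') :
    pvMach chars s p = s := by
  simp [pvMach, h1, h2]

lemma pvMach_pop (chars : List Char) (s : List Int × List (Int × Int)) (p : Int × Char)
    (o : Int) (rest : List Int) (h1 : p.2 = '}') (hs : s.1 = o :: rest)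
    (h2 : ¬(0 < p.1 ∧ PySem.List.pyGetD chars (p.1 - 1) ' ' = '\\')) :
    pvMach chars s p = (rest, s.2 ++ [(o, p.1)]) := by
  simp [pvMach, h1, hs, h2]

lemma pvMach_noop_close (chars : List Char) (s : List Int × List (Int × Int)) (p : Int × Char)
    (h1 : p.2 = '}') (h2 : 0 < p.1 ∧ PySem.List.pyGetD chars (p.1 - 1) ' ' = '\\') :
    pvMach chars s p = s := by
  simp [pvMach, h1, h2]

lemma pvMach_nil_close (chars : List Char) (s : List Int × List (Int × Int)) (p : Int × Char)
    (h1 : p.2 = '}') (hs : s.1 = []) :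
    pvMach chars s p = s := by
  simp [pvMach, h1, hs]

lemma pvMach_other (chars : List Char) (s : List Int × List (Int × Int)) (p : Int × Char)
    (h1 : p.2 ≠ '{') (h2 : p.2 ≠ '}') :
    pvMach chars s p = s := by
  simp [pvMach, h1, h2]

def pvInv (dA : PySem.Dict Int (Option Int)) (stk : List Int) (res : List (Int × Int)) : Prop :=
  dA.keys.Nodup ∧ dA.keys.Pairwise (· < ·) ∧ (∀ k ∈ dA.keys, 0 ≤ k) ∧
  stk.Pairwise (· > ·) ∧ (∀ s ∈ stk, dA.get? s = some none) ∧
  (pvFiltA dA.items).Perm res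

lemma pvStk_sub (dA : PySem.Dict Int (Option Int)) (stk : List Int)
    (hget : ∀ s ∈ stk, dA.get? s = some none) : ∀ s ∈ stk, s ∈ dA.keys := by
  intro s hs
  refine (PySem.Dict.contains_iff_mem_keys dA s).mp ?_
  rw [PySem.Dict.contains_eq_isSome_get?, hget s hs]
  rfl

lemma pvInv_push (dA : PySem.Dict Int (Option Int)) (stk : List Int) (res : List (Int × Int))
    (idx : Int) (hInv : pvInv dA stk res) (hpos : 0 ≤ idx) (hlt : ∀ k ∈ dA.keys, k < idx) :
    pvInv (dA.insert idx none) (idx :: stk) res := by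
  obtain ⟨hnd, hpw, hp0, hstk, hget, hperm⟩ := hInv
  have hnc : dA.contains idx = false := by
    rw [Bool.eq_false_iff]
    intro h
    exact absurd (hlt idx ((PySem.Dict.contains_iff_mem_keys dA idx).mp h)) (lt_irrefl idx)
  have hkeys := PySem.Dict.keys_insert_of_not_contains dA (none : Option Int) hnc
  have hsub := pvStk_sub dA stk hget
  refine ⟨?_, ?_, ?_, ?_, ?_, ?_⟩
  · rw [hkeys, List.nodup_append]
    exact ⟨hnd, List.nodup_singleton idx, by
      intro a ha b hb
      simp only [List.mem_singleton] at hb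
      exact fun he => absurd (hlt a ha) (by rw [he, hb]; exact lt_irrefl idx)⟩
  · rw [hkeys]
    refine List.pairwise_append.mpr ⟨hpw, List.pairwise_singleton _ _, ?_⟩
    intro a ha b hb
    simp only [List.mem_singleton] at hb
    rw [hb]; exact hlt a ha
  · rw [hkeys]
    intro k hk
    rcases List.mem_append.mp hk with h | h
    · exact hp0 k h
    · simp only [List.mem_singleton] at h; rw [h]; exact hpos
  · exact List.Pairwise.cons (fun s hs => hlt s (hsub s hs)) hstk
  · intro s hs
    rcases List.mem_cons.mp hs with h | h
    · rw [h]; exact PySem.Dict.get?_insert_self dA idx none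
    · have hne : s ≠ idx := fun he => absurd (hlt s (hsub s h)) (by rw [he]; exact lt_irrefl idx)
      rw [PySem.Dict.get?_insert_of_ne dA none hne]
      exact hget s h
  · rw [PySem.Dict.items_insert_of_not_contains dA (none : Option Int) hnc]
    have : pvFiltA (dA.items ++ [(idx, none)]) = pvFiltA dA.items := by
      simp [pvFiltA]
    rw [this]; exact hperm

lemma pvClose_map (idx o : Int) (L1 L2 : List (Int × Option Int))
    (h1 : o ∉ L1.map (·.1)) (h2 : o ∉ L2.map (·.1)) :
    pvFiltA ((L1 ++ (o, none) :: L2).map (fun q => if q.1 == o then (o, some idx) else q))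
      = pvFiltA L1 ++ (o, idx) :: pvFiltA L2 := by
  have e1 : L1.map (fun q => if q.1 == o then (o, some idx) else q) = L1 := by
    conv_rhs => rw [← List.map_id L1]
    refine List.map_congr_left fun q hq => ?_
    have : q.1 ≠ o := fun he => h1 (List.mem_map.mpr ⟨q, hq, he⟩)
    simp [this]
  have e2 : L2.map (fun q => if q.1 == o then (o, some idx) else q) = L2 := by
    conv_rhs => rw [← List.map_id L2]
    refine List.map_congr_left fun q hq => ?_
    have : q.1 ≠ o := fun he => h2 (List.mem_map.mpr ⟨q, hq, he⟩)
    simp [this]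
  rw [List.map_append, List.map_cons, e1, e2]
  simp [pvFiltA]

lemma pvFiltA_insert_close (d : PySem.Dict Int (Option Int)) (o idx : Int)
    (hnd : d.keys.Nodup) (ho : d.get? o = some none) :
    (pvFiltA (d.insert o (some idx)).items).Perm (pvFiltA d.items ++ [(o, idx)]) := by
  have hc : d.contains o = true := by rw [PySem.Dict.contains_eq_isSome_get?, ho]; rfl
  have hmem := PySem.Dict.mem_items_of_get?_eq_some d ho
  obtain ⟨L1, L2, hL⟩ := List.append_of_mem hmem
  have hks : d.keys = L1.map (·.1) ++ o :: L2.map (·.1) := by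
    simp only [PySem.Dict.keys, hL, List.map_append, List.map_cons]
  rw [hks] at hnd
  rw [List.nodup_append] at hnd
  have h1 : o ∉ L1.map (·.1) := fun h => hnd.2.2 o h o (by simp) rfl
  have h2 : o ∉ L2.map (·.1) := by
    have := hnd.2.1
    simp only [List.nodup_cons] at this; exact this.1
  rw [PySem.Dict.items_insert_of_contains d (some idx) hc, hL, pvClose_map idx o L1 L2 h1 h2]
  have : pvFiltA (L1 ++ (o, (none : Option Int)) :: L2) = pvFiltA L1 ++ pvFiltA L2 := by
    simp [pvFiltA]
  rw [this]
  have hp : ((o, idx) :: pvFiltA L2).Perm (pvFiltA L2 ++ [(o, idx)]) :=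
    (List.perm_append_singleton _ _).symm
  simpa [List.append_assoc] using List.Perm.append_left (pvFiltA L1) hp

lemma pvInv_pop (dA : PySem.Dict Int (Option Int)) (stk : List Int) (res : List (Int × Int))
    (o idx : Int) (rest : List Int) (hstk : stk = o :: rest) (hInv : pvInv dA stk res) :
    pvInv (dA.insert o (some idx)) rest (res ++ [(o, idx)]) := by
  subst hstk
  obtain ⟨hnd, hpw, hp0, hstk, hget, hperm⟩ := hInv
  have ho : dA.get? o = some none := hget o (List.mem_cons_self)
  have hc : dA.contains o = true := by rw [PySem.Dict.contains_eq_isSome_get?, ho]; rfl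
  have hkeys := PySem.Dict.keys_insert_of_contains dA (some idx) hc
  have hgt : ∀ s ∈ rest, o > s := (List.pairwise_cons.mp hstk).1
  refine ⟨by rw [hkeys]; exact hnd, by rw [hkeys]; exact hpw, by rw [hkeys]; exact hp0,
    (List.pairwise_cons.mp hstk).2, ?_, ?_⟩
  · intro s hs
    have hne : s ≠ o := fun he => absurd (hgt s hs) (by rw [he]; exact lt_irrefl o)
    rw [PySem.Dict.get?_insert_of_ne dA (some idx) hne]
    exact hget s (List.mem_cons_of_mem o hs)
  · exact (pvFiltA_insert_close dA o idx hnd ho).trans (hperm.append_right [(o, idx)])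

lemma pvMain (chars : List Char) : ∀ (l : List (Int × Char)) (stk : List Int)
    (dA : PySem.Dict Int (Option Int)) (res : List (Int × Int)),
    pvInv dA stk res →
    (∀ p ∈ l, 0 ≤ p.1 ∧ ∀ k ∈ dA.keys, k < p.1) →
    l.Pairwise (fun p q => p.1 < q.1) →
    (l.foldl (pvStepA chars) (stk, dA)).1 = (l.foldl (pvMach chars) (stk, res)).1 ∧
    pvInv (l.foldl (pvStepA chars) (stk, dA)).2 (l.foldl (pvStepA chars) (stk, dA)).1
      (l.foldl (pvMach chars) (stk, res)).2 := by
  intro l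
  induction l with
  | nil => intro stk dA res hInv _ _; exact ⟨rfl, hInv⟩
  | cons p t ih =>
    intro stk dA res hInv hlt hmono
    obtain ⟨hp0, hpk⟩ := hlt p (List.mem_cons_self)
    have hmt : t.Pairwise (fun p q => p.1 < q.1) := (List.pairwise_cons.mp hmono).2
    have hpt : ∀ q ∈ t, p.1 < q.1 := (List.pairwise_cons.mp hmono).1
    have hltt : ∀ q ∈ t, 0 ≤ q.1 ∧ ∀ k ∈ dA.keys, k < q.1 := fun q hq =>
      ⟨(hlt q (List.mem_cons_of_mem p hq)).1, fun k hk => lt_trans (hpk k hk) (hpt q hq)⟩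
    have hsub := pvStk_sub dA stk hInv.2.2.2.2.1
    simp only [List.foldl_cons]
    by_cases hob : p.2 = '{'
    · by_cases hesc : 0 < p.1 ∧ PySem.List.pyGetD chars (p.1 - 1) ' ' = '\\'
      · -- escaped opening brace: both no-ops
        rw [pvStepA_skip_open chars (stk, dA) p hob
              (by push Not; exact ⟨by have := hesc.1; omega, hesc.2⟩),
            pvMach_skip_open chars (stk, res) p hob hesc]
        exact ih stk dA res hInv hltt hmt
      · -- unescaped opening brace: both push
        have hu : p.1 = 0 ∨ PySem.List.pyGetD chars (p.1 - 1) ' ' ≠ '\\' := by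
          by_cases h0 : p.1 = 0
          · exact Or.inl h0
          · exact Or.inr (fun he => hesc ⟨by omega, he⟩)
        have hnc : dA.contains p.1 = false := by
          rw [Bool.eq_false_iff]
          intro h
          exact absurd (hpk p.1 ((PySem.Dict.contains_iff_mem_keys dA p.1).mp h)) (lt_irrefl p.1)
        rw [pvStepA_push chars (stk, dA) p hob hu, pvMach_push chars (stk, res) p hob hesc]
        refine ih (p.1 :: stk) (dA.insert p.1 none) res
          (pvInv_push dA stk res p.1 hInv hp0 hpk) ?_ hmt
        intro q hq
        refine ⟨(hltt q hq).1, ?_⟩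
        intro k hk
        rw [PySem.Dict.keys_insert_of_not_contains dA (none : Option Int) hnc] at hk
        rcases List.mem_append.mp hk with h | h
        · exact (hltt q hq).2 k h
        · simp only [List.mem_singleton] at h; rw [h]; exact hpt q hq
    · by_cases hcb : p.2 = '}'
      · cases stk with
        | nil =>
          rw [pvStepA_nil_close chars ([], dA) p hcb rfl, pvMach_nil_close chars ([], res) p hcb rfl]
          exact ih [] dA res hInv hltt hmt
        | cons o rest =>
          have ho : dA.get? o = some none := hInv.2.2.2.2.1 o (List.mem_cons_self)
          have homem : o ∈ dA.keys := pvStk_sub dA (o :: rest) hInv.2.2.2.2.1 o (List.mem_cons_self)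
          have hop : 0 < p.1 := lt_of_le_of_lt (hInv.2.2.1 o homem) (hpk o homem)
          by_cases hpe : PySem.List.pyGetD chars (p.1 - 1) ' ' = '\\'
          · -- escaped closing brace: both no-ops
            rw [pvStepA_noop_close chars (o :: rest, dA) p hcb (by push Not; intro _; exact hpe),
                pvMach_noop_close chars (o :: rest, res) p hcb ⟨hop, hpe⟩]
            exact ih (o :: rest) dA res hInv hltt hmt
          · -- unescaped closing brace with nonempty stack: both pop
            rw [pvStepA_pop chars (o :: rest, dA) p o rest hcb rfl ⟨hop, hpe⟩,
                pvMach_pop chars (o :: rest, res) p o rest hcb rfl (by push Not; intro _; exact hpe)]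
            refine ih rest (dA.insert o (some p.1)) (res ++ [(o, p.1)])
              (pvInv_pop dA (o :: rest) res o p.1 rest rfl hInv) ?_ hmt
            intro q hq
            refine ⟨(hltt q hq).1, ?_⟩
            intro k hk
            rw [PySem.Dict.keys_insert_of_contains dA (some p.1) (by
              rw [PySem.Dict.contains_eq_isSome_get?, ho]; rfl)] at hk
            exact (hltt q hq).2 k hk
      · rw [pvStepA_other chars (stk, dA) p hob hcb, pvMach_other chars (stk, res) p hob hcb]
        exact ih stk dA res hInv hltt hmt

lemma pvFiltA_pairwise (items : List (Int × Option Int))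
    (h : (items.map (·.1)).Pairwise (· < ·)) :
    (pvFiltA items).Pairwise (fun a b => a.1 < b.1) := by
  induction items with
  | nil => simp [pvFiltA]
  | cons p t ih =>
    simp only [List.map_cons, List.pairwise_cons] at h
    have ht := ih h.2
    match hp : p.2 with
    | none => simpa [pvFiltA, hp] using ht
    | some cl =>
      simp only [pvFiltA, List.filterMap_cons, hp, Option.map_some]
      refine List.Pairwise.cons ?_ ht
      intro q hq
      have : q.1 ∈ (t.map (·.1)) := by
        simp only [List.mem_filterMap] at hq
        obtain ⟨r, hr, he⟩ := hq
        cases h2 : r.2 with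
        | none => simp [h2] at he
        | some v =>
          simp only [h2, Option.map_some, Option.some_inj] at he
          exact List.mem_map.mpr ⟨r, hr, by simp [← he]⟩
      simpa using h.1 _ (by simpa using this)

-- the stack matcher restricted to the brace tokens, written structurally
def pvPairsOf : List Int → List (Int × Char) → List (Int × Int)
  | _, [] => []
  | stk, (i, c) :: ts =>
      if c = '{' then pvPairsOf (i :: stk) ts
      else match stk with
        | [] => pvPairsOf [] ts
        | o :: s => (o, i) :: pvPairsOf s ts

-- the closing braces a token list leaves unmatched (clamped-depth semantics)
def pvExcess : List (Int × Char) → List Int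
  | [] => []
  | (i, c) :: ts => if c = '{' then (pvExcess ts).tail else i :: pvExcess ts

lemma pvScanAt_eq : ∀ (ts : List (Int × Char)) (d : Int), 0 ≤ d →
    pvScanAt d ts = (pvExcess ts)[d.toNat]? := by
  intro ts
  induction ts with
  | nil => intro d _; simp [pvScanAt, pvExcess]
  | cons p ts ih =>
    intro d hd
    obtain ⟨i, c⟩ := p
    by_cases hc : c = '{'
    · have h1 : pvScanAt d ((i, c) :: ts) = pvScanAt (d + 1) ts := by simp [pvScanAt, hc]
      have h2 : pvExcess ((i, c) :: ts) = (pvExcess ts).tail := by simp [pvExcess, hc]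
      have hn : (d + 1).toNat = d.toNat + 1 := by omega
      rw [h1, h2, ih (d + 1) (by omega), hn]
      cases pvExcess ts <;> simp
    · have h2 : pvExcess ((i, c) :: ts) = i :: pvExcess ts := by simp [pvExcess, hc]
      by_cases h0 : d = 0
      · have h1 : pvScanAt d ((i, c) :: ts) = some i := by simp [pvScanAt, hc, h0]
        rw [h1, h2, h0]
        simp
      · have h1 : pvScanAt d ((i, c) :: ts) = pvScanAt (d - 1) ts := by
          simp [pvScanAt, hc, h0]
        have hn : d.toNat = (d - 1).toNat + 1 := by omega
        rw [h1, h2, ih (d - 1) (by omega), hn]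
        simp

lemma pvPairs_perm : ∀ (ts : List (Int × Char)) (stk : List Int),
    (pvPairsOf stk ts).Perm (stk.zip (pvExcess ts) ++ pvScanPairs ts) := by
  intro ts
  induction ts with
  | nil => intro stk; simp [pvPairsOf, pvExcess, pvScanPairs]
  | cons p ts ih =>
    intro stk
    obtain ⟨i, c⟩ := p
    by_cases hc : c = '{'
    · have hscan : pvScanAt 0 ts = (pvExcess ts)[(0 : Nat)]? := pvScanAt_eq ts 0 (le_refl 0)
      cases hex : pvExcess ts with
      | nil =>
        have h1 : pvPairsOf stk ((i, c) :: ts) = pvPairsOf (i :: stk) ts := by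
          simp [pvPairsOf, hc]
        have h2 : pvScanPairs ((i, c) :: ts) = pvScanPairs ts := by
          simp [pvScanPairs, hc, hscan, hex]
        have h3 : pvExcess ((i, c) :: ts) = [] := by simp [pvExcess, hc, hex]
        rw [h1, h2, h3]
        simpa [hex] using ih (i :: stk)
      | cons e ex =>
        have h1 : pvPairsOf stk ((i, c) :: ts) = pvPairsOf (i :: stk) ts := by
          simp [pvPairsOf, hc]
        have h2 : pvScanPairs ((i, c) :: ts) = (i, e) :: pvScanPairs ts := by
          simp [pvScanPairs, hc, hscan, hex]
        have h3 : pvExcess ((i, c) :: ts) = ex := by simp [pvExcess, hc, hex]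
        rw [h1, h2, h3]
        refine (ih (i :: stk)).trans ?_
        rw [hex]
        simp only [List.zip_cons_cons, List.cons_append]
        exact (List.perm_middle).symm
    · have h3 : pvExcess ((i, c) :: ts) = i :: pvExcess ts := by simp [pvExcess, hc]
      have h2 : pvScanPairs ((i, c) :: ts) = pvScanPairs ts := by simp [pvScanPairs, hc]
      cases stk with
      | nil =>
        have h1 : pvPairsOf [] ((i, c) :: ts) = pvPairsOf [] ts := by simp [pvPairsOf, hc]
        rw [h1, h2, h3]
        simpa using ih []
      | cons o s =>
        have h1 : pvPairsOf (o :: s) ((i, c) :: ts) = (o, i) :: pvPairsOf s ts := by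
          simp [pvPairsOf, hc]
        rw [h1, h2, h3]
        simpa using (ih s).cons (o, i)

lemma pvMach_eq_pairsOf (chars : List Char) : ∀ (l : List (Int × Char)),
    (∀ p ∈ l, (0 : Int) ≤ p.1) → ∀ (stk : List Int) (res : List (Int × Int)),
    (l.foldl (pvMach chars) (stk, res)).2 =
      res ++ pvPairsOf stk (l.filter
        (fun p => decide ((p.2 = '{' ∨ p.2 = '}') ∧ (p.1 = 0 ∨ PySem.List.pyGetD chars (p.1 - 1) ' ' ≠ '\\')))) := by
  intro l
  induction l with
  | nil => intro _ stk res; simp [pvPairsOf]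
  | cons p t ih =>
    intro hnn stk res
    have hp0 : (0 : Int) ≤ p.1 := hnn p (List.mem_cons_self)
    have hnt : ∀ q ∈ t, (0 : Int) ≤ q.1 := fun q hq => hnn q (List.mem_cons_of_mem p hq)
    simp only [List.foldl_cons, List.filter_cons]
    by_cases hesc : 0 < p.1 ∧ PySem.List.pyGetD chars (p.1 - 1) ' ' = '\\'
    · -- escaped: filtered out, machine no-op
      have hfe : ¬(p.1 = 0 ∨ PySem.List.pyGetD chars (p.1 - 1) ' ' ≠ '\\') := by
        push Not; exact ⟨by omega, hesc.2⟩
      by_cases hob : p.2 = '{'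
      · rw [pvMach_skip_open chars (stk, res) p hob hesc]
        simpa [hfe] using ih hnt stk res
      · by_cases hcb : p.2 = '}'
        · rw [pvMach_noop_close chars (stk, res) p hcb hesc]
          simpa [hfe] using ih hnt stk res
        · rw [pvMach_other chars (stk, res) p hob hcb]
          simpa [hob, hcb] using ih hnt stk res
    · -- unescaped
      have hfu : p.1 = 0 ∨ PySem.List.pyGetD chars (p.1 - 1) ' ' ≠ '\\' := by
        by_cases h0 : p.1 = 0
        · exact Or.inl h0
        · exact Or.inr (fun he => hesc ⟨by omega, he⟩)
      by_cases hob : p.2 = '{'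
      · rw [pvMach_push chars (stk, res) p hob hesc]
        have := ih hnt (p.1 :: stk) res
        simpa [hob, hfu, pvPairsOf] using this
      · by_cases hcb : p.2 = '}'
        · cases stk with
          | nil =>
            rw [pvMach_nil_close chars ([], res) p hcb rfl]
            have := ih hnt [] res
            simpa [hcb, hob, hfu, pvPairsOf] using this
          | cons o s =>
            rw [pvMach_pop chars ((o :: s), res) p o s hcb rfl hesc]
            have := ih hnt s (res ++ [(o, p.1)])
            simpa [hcb, hob, hfu, pvPairsOf, List.append_assoc] using this
        · rw [pvMach_other chars (stk, res) p hob hcb]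
          simpa [hob, hcb] using ih hnt stk res

lemma pvScanPairs_fst : ∀ (ts : List (Int × Char)), ∀ q ∈ pvScanPairs ts, q.1 ∈ ts.map (·.1) := by
  intro ts
  induction ts with
  | nil => intro q hq; simp [pvScanPairs] at hq
  | cons p ts ih =>
    intro q hq
    obtain ⟨i, c⟩ := p
    by_cases hc : c = '{'
    · cases hscan : pvScanAt 0 ts with
      | none =>
        have heq : pvScanPairs ((i, c) :: ts) = pvScanPairs ts := by
          simp [pvScanPairs, hc, hscan]
        rw [heq] at hq
        exact List.mem_cons_of_mem _ (ih q hq)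
      | some j =>
        have heq : pvScanPairs ((i, c) :: ts) = (i, j) :: pvScanPairs ts := by
          simp [pvScanPairs, hc, hscan]
        rw [heq] at hq
        rcases List.mem_cons.mp hq with h | h
        · rw [h]; exact List.mem_cons_self
        · exact List.mem_cons_of_mem _ (ih q h)
    · simp only [pvScanPairs, if_pos hc] at hq
      exact List.mem_cons_of_mem _ (ih q hq)

lemma pvScanPairs_pairwise : ∀ (ts : List (Int × Char)),
    ts.Pairwise (fun p q => p.1 < q.1) →
    (pvScanPairs ts).Pairwise (fun a b => a.1 < b.1) := by
  intro ts
  induction ts with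
  | nil => intro _; simp [pvScanPairs]
  | cons p ts ih =>
    intro h
    obtain ⟨hhd, htl⟩ := List.pairwise_cons.mp h
    obtain ⟨i, c⟩ := p
    by_cases hc : c = '{'
    · cases hscan : pvScanAt 0 ts with
      | none =>
        have heq : pvScanPairs ((i, c) :: ts) = pvScanPairs ts := by
          simp [pvScanPairs, hc, hscan]
        rw [heq]
        exact ih htl
      | some j =>
        have heq : pvScanPairs ((i, c) :: ts) = (i, j) :: pvScanPairs ts := by
          simp [pvScanPairs, hc, hscan]
        rw [heq]
        refine List.Pairwise.cons ?_ (ih htl)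
        intro b hb
        have := pvScanPairs_fst ts b hb
        obtain ⟨q, hq, he⟩ := List.mem_map.mp this
        have := hhd q hq
        simpa [← he] using this
    · simp only [pvScanPairs, if_pos hc]
      exact ih htl

-- ===== VERDICT (by name: the statement is the Claim_ definition above) =====
theorem parse_braces_py_spec : Claim_equal_parse_braces_py := by
  intro pat _
  unfold Spec_parse_braces_py parse_braces_py parse_braces_py_alt
  have hinv0 : pvInv PySem.Dict.empty [] [] := by
    refine ⟨?_, ?_, ?_, ?_, ?_, ?_⟩ <;> simp [pvFiltA, PySem.Dict.empty]
  have hnn : ∀ p ∈ PySem.List.enumerate pat.toList 0, (0 : Int) ≤ p.1 := by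
    intro p hp
    rw [PySem.List.mem_enumerate_iff] at hp
    obtain ⟨k, hk, he⟩ := hp
    rw [he]; positivity
  have h := pvMain pat.toList (PySem.List.enumerate pat.toList 0) [] PySem.Dict.empty [] hinv0
    (by
      intro p hp
      refine ⟨hnn p hp, ?_⟩
      intro kk hkk
      rw [PySem.Dict.keys_empty] at hkk
      exact absurd hkk (List.not_mem_nil))
    (PySem.List.pairwise_lt_enumerate _ _)
  obtain ⟨hnd', hpw', _, _, _, hperm'⟩ := h.2
  -- the filtered token list
  have htok := pvMach_eq_pairsOf pat.toList (PySem.List.enumerate pat.toList 0) hnn [] []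
  set braces := (PySem.List.enumerate pat.toList 0).filter
    (fun p => decide ((p.2 = '{' ∨ p.2 = '}') ∧
      (p.1 = 0 ∨ PySem.List.pyGetD pat.toList (p.1 - 1) ' ' ≠ '\\'))) with hbr
  have hperm2 : ((PySem.List.enumerate pat.toList 0).foldl (pvMach pat.toList) ([], [])).2.Perm
      (pvScanPairs braces) := by
    rw [htok]
    simpa using pvPairs_perm braces []
  -- A's result: strictly ascending and a permutation of the machine's pairs
  have hApw : (pvFiltA ((PySem.List.enumerate pat.toList 0).foldl (pvStepA pat.toList)
      ([], PySem.Dict.empty)).2.items).Pairwise (fun a b => a.1 < b.1) :=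
    pvFiltA_pairwise _ (by simpa [PySem.Dict.keys] using hpw')
  -- B's result: strictly ascending and a permutation of the machine's pairs
  have hBpw : (pvScanPairs braces).Pairwise (fun a b => a.1 < b.1) := by
    refine pvScanPairs_pairwise braces ?_
    exact (PySem.List.pairwise_lt_enumerate _ _).filter _
  have hAperm : (pvFiltA ((PySem.List.enumerate pat.toList 0).foldl (pvStepA pat.toList)
      ([], PySem.Dict.empty)).2.items).Perm
      ((PySem.List.enumerate pat.toList 0).foldl (pvMach pat.toList) ([], [])).2 := hperm'
  have hBperm : (pvScanPairs braces).Perm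
      ((PySem.List.enumerate pat.toList 0).foldl (pvMach pat.toList) ([], [])).2 := hperm2.symm
  have hA := PySem.List.sorted_eq_of_perm_of_pairwise_lt _ _ _ hAperm hApw
  have hB := PySem.List.sorted_eq_of_perm_of_pairwise_lt _ _ _ hBperm hBpw
  rw [← hA, ← hB]
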